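-- pv_equiv track=rewrite | github.com/expiracy/resistor | detection/backup/ResistorLocato4.py | get_contour_coordinates
-- ===== SOURCE A (Python) =====
-- def get_contour_coordinates(contours):
--     x_list = []
--     y_list = []
--
--     for contour in contours:
--         for index in contour:
--             for type in index:
--                 x_list.append(type[0])
--                 y_list.append(type[1])
--
--     return x_list, y_list
-- ===== SOURCE B (Python) =====
-- def get_contour_coordinates(contours):
--     # explicit-stack depth-first traversal of the nesting, one loop, no nested loops
--     x_list, y_list = [], []
--     stack = [(0, contours)]
--     while stack:
--         depth, node = stack.pop()
--         if depth == 3: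
--             x_list.append(node[0])
--             y_list.append(node[1])
--         else:
--             for child in reversed(node):
--                 stack.append((depth + 1, child))
--     return x_list, y_list
-- ===== Notes on version B (the rewrite author's own statement) =====
-- stated objective: alternative
-- what changed: Replaces the three hard-coded nested loops by a single loop over an explicit depth-tagged work stack that traverses the nesting as a tree (children pushed in reverse so the left-to-right order is preserved).
import Mathlib
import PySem

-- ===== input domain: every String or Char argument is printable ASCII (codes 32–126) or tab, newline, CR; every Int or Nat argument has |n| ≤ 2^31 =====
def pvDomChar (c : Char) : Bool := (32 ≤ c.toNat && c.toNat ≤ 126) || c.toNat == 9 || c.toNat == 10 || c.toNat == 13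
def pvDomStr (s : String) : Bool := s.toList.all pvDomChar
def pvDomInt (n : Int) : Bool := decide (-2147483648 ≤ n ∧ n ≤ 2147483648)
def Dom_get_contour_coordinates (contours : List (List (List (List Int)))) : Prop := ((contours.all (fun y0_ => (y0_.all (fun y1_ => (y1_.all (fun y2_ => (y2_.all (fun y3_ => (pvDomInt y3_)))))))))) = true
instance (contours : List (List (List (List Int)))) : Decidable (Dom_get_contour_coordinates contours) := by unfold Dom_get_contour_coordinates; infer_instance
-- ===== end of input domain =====

-- B replaces A's three hard-coded nested loops by a single loop over an explicit
-- depth-tagged work stack traversing the nesting as a tree (alternative decomposition).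

-- ===== PORT A =====
-- innermost loop body: x_list.append(type[0]); y_list.append(type[1])
def pvStepA (st : List Int × List Int) (t : List Int) : List Int × List Int :=
  (st.1 ++ [((PySem.List.pyGet? t 0).getD 0)], st.2 ++ [((PySem.List.pyGet? t 1).getD 0)])

def get_contour_coordinates (contours : List (List (List (List Int)))) : List Int × List Int :=
  contours.foldl (fun st contour =>
    contour.foldl (fun st index => index.foldl pvStepA st) st) ([], [])

-- ===== PORT B =====
-- a depth-tagged stack entry: Python's (depth, node) pair
inductive PVNode
  | d0 : List (List (List (List Int))) → PVNode
  | d1 : List (List (List Int)) → PVNode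
  | d2 : List (List Int) → PVNode
  | d3 : List Int → PVNode
deriving DecidableEq, Repr

def pvWeight : PVNode → Nat
  | .d3 _ => 1
  | .d2 i => 1 + i.length
  | .d1 c => 1 + (c.map (fun i => 1 + i.length)).sum
  | .d0 cs => 1 + (cs.map (fun c => 1 + (c.map (fun i => 1 + i.length)).sum)).sum

-- the while-loop over the stack (head = top of stack); pushing reversed(node) in Python
-- means the children end up on top in original order, i.e. prepended here in order
def pvRun : List PVNode → List Int × List Int → List Int × List Int
  | [], acc => acc
  | (.d3 p) :: rest, acc =>
      pvRun rest (acc.1 ++ [((PySem.List.pyGet? p 0).getD 0)], acc.2 ++ [((PySem.List.pyGet? p 1).getD 0)])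
  | (.d2 i) :: rest, acc => pvRun (i.map PVNode.d3 ++ rest) acc
  | (.d1 c) :: rest, acc => pvRun (c.map PVNode.d2 ++ rest) acc
  | (.d0 cs) :: rest, acc => pvRun (cs.map PVNode.d1 ++ rest) acc
termination_by stack _ => (stack.map pvWeight).sum
decreasing_by
  · simp [pvWeight]
  · simp [pvWeight, Function.comp_def]
  · simp [pvWeight, Function.comp_def]
  · simp [pvWeight, Function.comp_def]

def get_contour_coordinates_alt (contours : List (List (List (List Int)))) : List Int × List Int :=
  pvRun [PVNode.d0 contours] ([], [])

-- ===== PRECONDITION & SPEC =====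
-- A (and B) raise IndexError on any innermost point with fewer than 2 coordinates; Pre_ excludes exactly those inputs.
def Pre_get_contour_coordinates (contours : List (List (List (List Int)))) : Prop :=
  ∀ contour ∈ contours, ∀ index ∈ contour, ∀ p ∈ index, 2 ≤ p.length
instance (contours : List (List (List (List Int)))) : Decidable (Pre_get_contour_coordinates contours) := by unfold Pre_get_contour_coordinates; infer_instance
def pvWitness_get_contour_coordinates : List (List (List (List Int))) := [[[[1, 2], [3, 4]]]]

def Spec_get_contour_coordinates (contours : List (List (List (List Int)))) (out : List Int × List Int) : Prop := out = get_contour_coordinates_alt contours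
instance (contours : List (List (List (List Int)))) (out : List Int × List Int) : Decidable (Spec_get_contour_coordinates contours out) := by unfold Spec_get_contour_coordinates; infer_instance

-- ===== CLAIM (what is proved, stated in full; the proofs are below) =====
def Claim_equal_get_contour_coordinates : Prop := ∀ (contours : List (List (List (List Int)))), Dom_get_contour_coordinates contours → Pre_get_contour_coordinates contours → Spec_get_contour_coordinates contours (get_contour_coordinates contours)

-- ===== LEMMAS AND PROOFS =====
def pvPair (p : List Int) : Int × Int :=
  (((PySem.List.pyGet? p 0).getD 0), ((PySem.List.pyGet? p 1).getD 0))

theorem flatMap_single {α β : Type} (f : α → β) (l : List α) :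
    l.flatMap (fun a => [f a]) = l.map f := by
  induction l with
  | nil => rfl
  | cons a l ih => simp [ih]

-- the pairs a single stack entry contributes, in emission order
def pvPairs : PVNode → List (Int × Int)
  | .d3 p => [pvPair p]
  | .d2 i => i.map pvPair
  | .d1 c => c.flatMap (fun i => i.map pvPair)
  | .d0 cs => cs.flatMap (fun c => c.flatMap (fun i => i.map pvPair))

theorem pvRun_eq_aux (n : Nat) : ∀ (stack : List PVNode) (acc : List Int × List Int),
    (stack.map pvWeight).sum ≤ n →
    pvRun stack acc =
      (acc.1 ++ (stack.flatMap pvPairs).map Prod.fst,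
       acc.2 ++ (stack.flatMap pvPairs).map Prod.snd) := by
  induction n with
  | zero =>
      intro stack acc h
      cases stack with
      | nil => simp [pvRun]
      | cons hd tl => exfalso; cases hd <;> simp [pvWeight] at h
  | succ n ih =>
      intro stack acc h
      match stack with
      | [] => simp [pvRun]
      | .d3 p :: rest =>
          rw [pvRun, ih rest _ (by simp [pvWeight] at h; omega)]
          simp [pvPairs, pvPair]
      | .d2 i :: rest =>
          rw [pvRun, ih _ acc (by
            simp [pvWeight, Function.comp_def, List.map_map] at h ⊢; omega)]
          simp [pvPairs, List.flatMap_map, flatMap_single]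
      | .d1 c :: rest =>
          rw [pvRun, ih _ acc (by
            simp [pvWeight, Function.comp_def, List.map_map] at h ⊢; omega)]
          simp [pvPairs, List.flatMap_map]
      | .d0 cs :: rest =>
          rw [pvRun, ih _ acc (by
            simp [pvWeight, Function.comp_def, List.map_map] at h ⊢; omega)]
          simp [pvPairs, List.flatMap_map]

theorem pvRun_eq (stack : List PVNode) (acc : List Int × List Int) :
    pvRun stack acc =
      (acc.1 ++ (stack.flatMap pvPairs).map Prod.fst,
       acc.2 ++ (stack.flatMap pvPairs).map Prod.snd) :=
  pvRun_eq_aux ((stack.map pvWeight).sum) stack acc (Nat.le_refl _)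

theorem foldl_pvStepA (l : List (List Int)) (st : List Int × List Int) :
    l.foldl pvStepA st = (st.1 ++ (l.map pvPair).map Prod.fst, st.2 ++ (l.map pvPair).map Prod.snd) := by
  induction l generalizing st with
  | nil => simp
  | cons p l ih => simp [ih, pvStepA, pvPair]

theorem foldl_contour (c : List (List (List Int))) (st : List Int × List Int) :
    c.foldl (fun st index => index.foldl pvStepA st) st =
      (st.1 ++ ((c.flatMap (fun index => index.map pvPair)).map Prod.fst),
       st.2 ++ ((c.flatMap (fun index => index.map pvPair)).map Prod.snd)) := by
  induction c generalizing st with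
  | nil => simp
  | cons idx c ih =>
    rw [List.foldl_cons, foldl_pvStepA, ih]
    simp

theorem foldl_contours (cs : List (List (List (List Int)))) (st : List Int × List Int) :
    cs.foldl (fun st contour => contour.foldl (fun st index => index.foldl pvStepA st) st) st =
      (st.1 ++ ((cs.flatMap (fun contour => contour.flatMap (fun index => index.map pvPair))).map Prod.fst),
       st.2 ++ ((cs.flatMap (fun contour => contour.flatMap (fun index => index.map pvPair))).map Prod.snd)) := by
  induction cs generalizing st with
  | nil => simp
  | cons c cs ih =>
    rw [List.foldl_cons, foldl_contour, ih]
    simp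

-- ===== VERDICT (by name: the statement is the Claim_ definition above) =====
theorem get_contour_coordinates_spec : Claim_equal_get_contour_coordinates := by
  intro contours _ _
  unfold Spec_get_contour_coordinates get_contour_coordinates get_contour_coordinates_alt
  rw [foldl_contours, pvRun_eq]
  simp [pvPairs]
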